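-- pv_equiv track=rewrite | github.com/intelliswarm-ai/mail-pilot | src/email_enhanced_categorizer.py | _post_process_categories
-- ===== SOURCE A (Python) =====
-- from typing import Dict, List, Tuple, Optional
--
-- def _post_process_categories(categorized_emails: Dict[str, List[Dict]]) -> Dict[str, List[Dict]]:
--     """Post-process categories to merge similar ones and add uncategorized"""
--     processed_categories = {}
--     used_emails = set()  # Track which emails have been processed to avoid duplicates
--
--     # Merge similar categories WITHOUT duplicating emails
--     merge_patterns = {
--         'GitHub Development': ['GitHub & Development', 'GitHub Development'],
--         'Professional Development': ['LinkedIn Professional', 'Glassdoor Communications', 'Jobleads Communications'],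
--         'Entertainment & Media': ['Amazon Services', 'Netflix Entertainment']
--     }
--
--     # First pass: merge categories
--     for target_category, source_patterns in merge_patterns.items():
--         merged_emails = []
--
--         for category_name, emails in categorized_emails.items():
--             # Check if this category should be merged
--             should_merge = False
--             for pattern in source_patterns:
--                 if pattern in category_name:
--                     should_merge = True
--                     break
--
--             if should_merge:
--                 # Add emails that haven't been used yet
--                 for email in emails:
--                     email_id = email.get('id', f"{email.get('sender', '')}_{email.get('subject', '')}")
--                     if email_id not in used_emails:
--                         merged_emails.append(email)
--                         used_emails.add(email_id)
--
--         if merged_emails: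
--             processed_categories[f"{target_category} ({len(merged_emails)} emails)"] = merged_emails
--
--     # Second pass: add remaining categories that weren't merged
--     for category_name, emails in categorized_emails.items():
--         # Check if this category was merged
--         was_merged = False
--         for source_patterns in merge_patterns.values():
--             if any(pattern in category_name for pattern in source_patterns):
--                 was_merged = True
--                 break
--
--         if not was_merged:
--             # Add emails that haven't been used yet
--             remaining_emails = []
--             for email in emails:
--                 email_id = email.get('id', f"{email.get('sender', '')}_{email.get('subject', '')}")
--                 if email_id not in used_emails:
--                     remaining_emails.append(email)
--                     used_emails.add(email_id)
--
--             if remaining_emails: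
--                 processed_categories[category_name] = remaining_emails
--
--     return processed_categories
-- ===== SOURCE B (Python) =====
-- def _post_process_categories(categorized_emails):
--     """Post-process categories: enumerate all (bucket-rank, email) occurrences in
--     one flat scan, resolve duplicates globally by minimal bucket rank, then emit
--     each bucket from a rank-grouped index — no sequentially threaded used-set."""
--     merge_patterns = {
--         'GitHub Development': ['GitHub & Development', 'GitHub Development'],
--         'Professional Development': ['LinkedIn Professional', 'Glassdoor Communications', 'Jobleads Communications'],
--         'Entertainment & Media': ['Amazon Services', 'Netflix Entertainment']
--     }
--     targets = list(merge_patterns)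
--
--     def classify(name):
--         for idx, patterns in enumerate(merge_patterns.values()):
--             if any(p in name for p in patterns):
--                 return idx
--         return None
--
--     items = list(categorized_emails.items())
--
--     # one flat scan: every email occurrence tagged with its bucket's rank
--     # (targets rank 0..2; an unmerged category ranks after them by position)
--     occ = []
--     for pos, (name, emails) in enumerate(items):
--         r = classify(name)
--         if r is None:
--             r = len(targets) + pos
--         for email in emails:
--             eid = email.get('id', f"{email.get('sender', '')}_{email.get('subject', '')}")
--             occ.append((r, eid, email))
--
--     # global resolution: each email id belongs to its minimal-rank bucket
--     min_rank = {}
--     for r, eid, _ in occ: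
--         if eid not in min_rank or r < min_rank[eid]:
--             min_rank[eid] = r
--
--     # index the occurrences by bucket rank
--     groups = {}
--     for r, eid, email in occ:
--         groups.setdefault(r, []).append((eid, email))
--
--     def collect(r):
--         kept, seen = [], set()
--         for eid, email in groups.get(r, []):
--             if min_rank.get(eid) == r and eid not in seen:
--                 seen.add(eid)
--                 kept.append(email)
--         return kept
--
--     result = {}
--     for idx, target in enumerate(targets):
--         kept = collect(idx)
--         if kept:
--             result[f"{target} ({len(kept)} emails)"] = kept
--     for pos, (name, _) in enumerate(items):
--         if classify(name) is None:
--             kept = collect(len(targets) + pos)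
--             if kept:
--                 result[name] = kept
--     return result
-- ===== Notes on version B (the rewrite author's own statement) =====
-- stated objective: alternative
-- what changed: B drops A's sequentially threaded used_emails set entirely: it enumerates every (bucket-rank, email-id, email) occurrence in one flat scan (targets rank 0-2, unmerged categories ranked by position), builds a global minimal-rank map and a rank-grouped index, and emits each bucket by filtering its group against that map, instead of A's stateful two-pass merge that re-scans the source patterns per target and per category while mutating a used set as it builds the output.
import Mathlib
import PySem

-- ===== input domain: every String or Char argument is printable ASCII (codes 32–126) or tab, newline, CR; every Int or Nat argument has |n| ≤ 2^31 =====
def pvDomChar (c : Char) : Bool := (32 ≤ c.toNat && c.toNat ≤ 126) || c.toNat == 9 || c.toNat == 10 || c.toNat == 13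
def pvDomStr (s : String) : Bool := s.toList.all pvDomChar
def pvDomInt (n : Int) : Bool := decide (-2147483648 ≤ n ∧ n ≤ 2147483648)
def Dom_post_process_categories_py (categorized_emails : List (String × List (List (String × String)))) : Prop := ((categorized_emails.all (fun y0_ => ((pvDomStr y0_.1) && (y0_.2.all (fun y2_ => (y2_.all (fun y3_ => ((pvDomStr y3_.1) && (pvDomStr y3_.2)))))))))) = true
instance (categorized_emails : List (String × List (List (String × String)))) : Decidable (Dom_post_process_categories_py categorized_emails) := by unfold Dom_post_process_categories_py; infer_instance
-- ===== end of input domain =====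

-- B replaces A's stateful two-pass merge (which threads a used_emails set and re-scans the
-- source patterns per target and per category) by a flat enumeration of all
-- (bucket-rank, email-id, email) occurrences, a global minimal-rank resolution map,
-- and per-bucket filtering of that flat list (alternative algorithm; same return value).

abbrev PvEmail := List (String × String)
abbrev PvEntry := Int × String × PvEmail
abbrev PvCat := String × List PvEmail

-- ===== PORT A =====
-- email.get('id', f"{email.get('sender','')}_{email.get('subject','')}") — used verbatim by both Pythons
def pvEmailId (email : PvEmail) : String :=
  match PySem.Dict.get? (PySem.Dict.mk email) "id" with
  | some v => v
  | none =>
      PySem.Dict.getD (PySem.Dict.mk email) "sender" "" ++ "_" ++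
        PySem.Dict.getD (PySem.Dict.mk email) "subject" ""

-- the merge_patterns literal both Pythons contain
def pvMergePatterns : List (String × List String) :=
  [("GitHub Development", ["GitHub & Development", "GitHub Development"]),
   ("Professional Development",
      ["LinkedIn Professional", "Glassdoor Communications", "Jobleads Communications"]),
   ("Entertainment & Media", ["Amazon Services", "Netflix Entertainment"])]

-- the 'for email in emails: … if email_id not in used_emails: append; add' loop that
-- A's source repeats verbatim in both passes (state: collected list × used set)
def pvCollectA (emails : List PvEmail) (st : List PvEmail × PySem.Set String) :
    List PvEmail × PySem.Set String :=
  emails.foldl (fun st email =>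
    let eid := pvEmailId email
    if PySem.Set.contains st.2 eid then st
    else (st.1 ++ [email], PySem.Set.add st.2 eid)) st

def post_process_categories_py (categorized_emails : List (String × List (List (String × String)))) :
    List (String × List (List (String × String))) :=
  let st := pvMergePatterns.foldl (fun st tp =>
      let ms := categorized_emails.foldl (fun ms ne =>
          if tp.2.any (fun p => PySem.Str.isIn p ne.1) then pvCollectA ne.2 ms else ms)
        ([], st.2)
      if ms.1 ≠ [] then
        (PySem.Dict.insert st.1
          (tp.1 ++ " (" ++ PySem.Int.toStr (ms.1.length : Int) ++ " emails)") ms.1, ms.2)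
      else (st.1, ms.2))
    ((PySem.Dict.mk [] : PySem.Dict String (List PvEmail)), (PySem.Set.empty : PySem.Set String))
  let st2 := categorized_emails.foldl (fun st ne =>
      if pvMergePatterns.any (fun tp => tp.2.any (fun p => PySem.Str.isIn p ne.1)) then st
      else
        let rs := pvCollectA ne.2 ([], st.2)
        if rs.1 ≠ [] then (PySem.Dict.insert st.1 ne.1 rs.1, rs.2) else (st.1, rs.2)) st
  (st2.1).items

-- ===== PORT B =====
-- classify(name): index of the first merge target whose patterns substring-match, else None
def pvClassifyIdx (name : String) : Option Int :=
  ((PySem.List.enumerate (pvMergePatterns.map (·.2))).find?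
    (fun ip => ip.2.any (fun p => PySem.Str.isIn p name))).map (·.1)

-- one flat scan: every email occurrence tagged with its bucket's rank
def pvOcc (ce : List PvCat) : List PvEntry :=
  (PySem.List.enumerate ce).foldl (fun acc pe =>
    let r := match pvClassifyIdx pe.2.1 with | some i => i | none => 3 + pe.1
    pe.2.2.foldl (fun acc e => acc ++ [(r, pvEmailId e, e)]) acc) []

-- global resolution: each email id belongs to its minimal-rank bucket
def pvMinRank (occ : List PvEntry) : PySem.Dict String Int :=
  occ.foldl (fun d t =>
    match PySem.Dict.get? d t.2.1 with
    | none => PySem.Dict.insert d t.2.1 t.1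
    | some m => if t.1 < m then PySem.Dict.insert d t.2.1 t.1 else d) (PySem.Dict.mk [])

-- index the occurrences by bucket rank
def pvGroups (occ : List PvEntry) : PySem.Dict Int (List (String × PvEmail)) :=
  occ.foldl (fun d t => PySem.Dict.modify d t.1 [] (fun l => l ++ [(t.2.1, t.2.2)]))
    (PySem.Dict.mk [])

-- collect(r): the surviving emails of bucket r, read off the rank-grouped index
def pvCollect (groups : PySem.Dict Int (List (String × PvEmail)))
    (mr : PySem.Dict String Int) (r : Int) : List PvEmail :=
  ((PySem.Dict.getD groups r []).foldl (fun sk p =>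
    if PySem.Dict.get? mr p.1 = some r ∧ p.1 ∉ sk.1 then
      (PySem.Set.add sk.1 p.1, sk.2 ++ [p.2])
    else sk) ((PySem.Set.empty : PySem.Set String), ([] : List PvEmail))).2

def post_process_categories_py_alt (categorized_emails : List (String × List (List (String × String)))) :
    List (String × List (List (String × String))) :=
  let occ := pvOcc categorized_emails
  let mr := pvMinRank occ
  let groups := pvGroups occ
  let d1 := (PySem.List.enumerate pvMergePatterns).foldl (fun d it =>
      let kept := pvCollect groups mr it.1
      if kept ≠ [] then
        PySem.Dict.insert d (it.2.1 ++ " (" ++ PySem.Int.toStr (kept.length : Int) ++ " emails)") kept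
      else d) (PySem.Dict.mk [])
  let d2 := (PySem.List.enumerate categorized_emails).foldl (fun d pe =>
      if pvClassifyIdx pe.2.1 = none then
        let kept := pvCollect groups mr (3 + pe.1)
        if kept ≠ [] then PySem.Dict.insert d pe.2.1 kept else d
      else d) d1
  d2.items

-- ===== PRECONDITION & SPEC =====
def Spec_post_process_categories_py (categorized_emails : List (String × List (List (String × String)))) (out : List (String × List (List (String × String)))) : Prop := out = post_process_categories_py_alt categorized_emails
instance (categorized_emails : List (String × List (List (String × String)))) (out : List (String × List (List (String × String)))) : Decidable (Spec_post_process_categories_py categorized_emails out) := by unfold Spec_post_process_categories_py; infer_instance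

-- ===== CLAIM (what is proved, stated in full; the proofs are below) =====
def Claim_equal_post_process_categories_py : Prop := ∀ (categorized_emails : List (String × List (List (String × String)))), Dom_post_process_categories_py categorized_emails → Spec_post_process_categories_py categorized_emails (post_process_categories_py categorized_emails)


-- ===== LEMMAS AND PROOFS =====

abbrev PvSt := PySem.Dict String (List PvEmail) × PySem.Set String

-- ---------- A-side foundational lemmas (sequential take with a used set) ----------

def pvTake (used : PySem.Set String) (emails : List PvEmail) :
    PySem.Set String × List PvEmail :=
  emails.foldl (fun st email =>
    let eid := pvEmailId email
    if PySem.Set.contains st.1 eid then st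
    else (PySem.Set.add st.1 eid, st.2 ++ [email])) (used, [])

def pvTakeGo (st : PySem.Set String × List PvEmail) (es : List PvEmail) :
    PySem.Set String × List PvEmail :=
  es.foldl (fun st email =>
    let eid := pvEmailId email
    if PySem.Set.contains st.1 eid then st
    else (PySem.Set.add st.1 eid, st.2 ++ [email])) st

theorem take_eq_go (u : PySem.Set String) (es : List PvEmail) : pvTake u es = pvTakeGo (u, []) es := rfl

theorem go_cons (st : PySem.Set String × List PvEmail) (e : PvEmail) (es : List PvEmail) :
    pvTakeGo st (e :: es) =
      pvTakeGo (if pvEmailId e ∈ st.1 then st else (PySem.Set.add st.1 (pvEmailId e), st.2 ++ [e])) es := by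
  by_cases h : pvEmailId e ∈ st.1 <;> simp [pvTakeGo, h]

theorem go_acc (es : List PvEmail) :
    ∀ (u : PySem.Set String) (p : List PvEmail),
      pvTakeGo (u, p) es = ((pvTakeGo (u, []) es).1, p ++ (pvTakeGo (u, []) es).2) := by
  induction es with
  | nil => intro u p; simp [pvTakeGo]
  | cons e es ih =>
    intro u p
    by_cases h : pvEmailId e ∈ u
    · rw [go_cons, go_cons, if_pos h, if_pos h]; exact ih u p
    · rw [go_cons, go_cons, if_neg h, if_neg h, ih _ (p ++ [e]), ih _ ([] ++ [e])]
      simp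

theorem collect_cons (e : PvEmail) (es : List PvEmail) (st : List PvEmail × PySem.Set String) :
    pvCollectA (e :: es) st =
      pvCollectA es (if pvEmailId e ∈ st.2 then st
        else (st.1 ++ [e], PySem.Set.add st.2 (pvEmailId e))) := by
  by_cases h : pvEmailId e ∈ st.2 <;> simp [pvCollectA, h]

theorem collect_eq_take (es : List PvEmail) :
    ∀ (m : List PvEmail) (u : PySem.Set String),
      pvCollectA es (m, u) = (m ++ (pvTake u es).2, (pvTake u es).1) := by
  induction es with
  | nil => intro m u; simp [pvCollectA, pvTake]
  | cons e es ih =>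
    intro m u
    rw [collect_cons, take_eq_go, go_cons]
    by_cases h : pvEmailId e ∈ u
    · rw [if_pos h, if_pos h, ← take_eq_go, ih]
    · rw [if_neg h, if_neg h, ih, List.nil_append, go_acc es _ [e], take_eq_go]
      simp

theorem collect_mono (es : List PvEmail) :
    ∀ (st : List PvEmail × PySem.Set String) (x : String), x ∈ st.2 → x ∈ (pvCollectA es st).2 := by
  induction es with
  | nil => intro st x h; simpa [pvCollectA] using h
  | cons e es ih =>
    intro st x h
    rw [collect_cons]
    by_cases he : pvEmailId e ∈ st.2
    · rw [if_pos he]; exact ih st x h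
    · rw [if_neg he]
      exact ih _ x ((PySem.Set.mem_add st.2 (pvEmailId e) x).mpr (Or.inl h))

theorem collect_noop (es : List PvEmail) :
    ∀ (m : List PvEmail) (u : PySem.Set String), (∀ e ∈ es, pvEmailId e ∈ u) →
      pvCollectA es (m, u) = (m, u) := by
  induction es with
  | nil => intro m u _; simp [pvCollectA]
  | cons e es ih =>
    intro m u h
    rw [collect_cons, if_pos (h e (List.mem_cons_self ..))]
    exact ih m u (fun e' he' => h e' (List.mem_cons_of_mem _ he'))

theorem take_fst (u : PySem.Set String) (es : List PvEmail) :
    (pvTake u es).1 = (pvCollectA es ([], u)).2 := by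
  rw [collect_eq_take]

theorem take_mono (u : PySem.Set String) (es : List PvEmail) (x : String) (h : x ∈ u) :
    x ∈ (pvTake u es).1 := by
  rw [take_fst]; exact collect_mono es _ x h

def pvM1 (n : String) : Bool :=
  (["GitHub & Development", "GitHub Development"] : List String).any (fun p => PySem.Str.isIn p n)
def pvM2 (n : String) : Bool :=
  (["LinkedIn Professional", "Glassdoor Communications", "Jobleads Communications"] : List String).any
    (fun p => PySem.Str.isIn p n)
def pvM3 (n : String) : Bool :=
  (["Amazon Services", "Netflix Entertainment"] : List String).any (fun p => PySem.Str.isIn p n)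

def pvAfold (mu : String → Bool) (ce : List PvCat) (st : List PvEmail × PySem.Set String) :
    List PvEmail × PySem.Set String :=
  ce.foldl (fun ms ne => if mu ne.1 then pvCollectA ne.2 ms else ms) st

def pvBfold (beta : String → Bool) (ce : List PvCat) (st : PySem.Set String × List PvEmail) :
    PySem.Set String × List PvEmail :=
  ce.foldl (fun um ne =>
    if beta ne.1 then
      let tk := pvTake um.1 ne.2
      (tk.1, um.2 ++ tk.2)
    else um) st

theorem fold_eq (mu beta : String → Bool) (hbm : ∀ n, beta n = true → mu n = true) :
    ∀ (ce : List PvCat) (u : PySem.Set String) (m p : List PvEmail),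
      (∀ ne ∈ ce, mu ne.1 = true → beta ne.1 = false → ∀ e ∈ ne.2, pvEmailId e ∈ u) →
      pvAfold mu ce (m ++ p, u)
        = (m ++ (pvBfold beta ce (u, p)).2, (pvBfold beta ce (u, p)).1) := by
  intro ce
  induction ce with
  | nil => intro u m p _; simp [pvAfold, pvBfold]
  | cons ne ce ih =>
    intro u m p hinv
    by_cases hb : beta ne.1 = true
    · have hm : mu ne.1 = true := hbm _ hb
      rw [pvAfold, pvBfold, List.foldl_cons, List.foldl_cons]
      simp only [hb, hm, if_true]
      rw [collect_eq_take]
      have : m ++ p ++ (pvTake u ne.2).2 = m ++ (p ++ (pvTake u ne.2).2) := by simp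
      rw [this]
      exact ih (pvTake u ne.2).1 m (p ++ (pvTake u ne.2).2)
        (fun ne' h' hm' hb' e he => take_mono _ _ _ (hinv ne' (List.mem_cons_of_mem _ h') hm' hb' e he))
    · have hb' : beta ne.1 = false := by simpa using hb
      rw [pvAfold, pvBfold, List.foldl_cons, List.foldl_cons]
      simp only [hb', Bool.false_eq_true, if_false]
      by_cases hm : mu ne.1 = true
      · simp only [hm, if_true]
        rw [collect_noop ne.2 _ _ (hinv ne (List.mem_cons_self ..) hm hb')]
        exact ih u m p (fun ne' h' => hinv ne' (List.mem_cons_of_mem _ h'))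
      · simp only [hm]
        exact ih u m p (fun ne' h' => hinv ne' (List.mem_cons_of_mem _ h'))

def pvApass (mu : String → Bool) (t : String) (ce : List PvCat) (st : PvSt) : PvSt :=
  let ms := pvAfold mu ce ([], st.2)
  if ms.1 ≠ [] then
    (PySem.Dict.insert st.1 (t ++ " (" ++ PySem.Int.toStr (ms.1.length : Int) ++ " emails)") ms.1, ms.2)
  else (st.1, ms.2)

def pvA2 (ce : List PvCat) (st : PvSt) : PvSt :=
  ce.foldl (fun st ne =>
    if pvMergePatterns.any (fun tp => tp.2.any (fun p => PySem.Str.isIn p ne.1)) then st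
    else
      let rs := pvCollectA ne.2 ([], st.2)
      if rs.1 ≠ [] then (PySem.Dict.insert st.1 ne.1 rs.1, rs.2) else (st.1, rs.2)) st

-- ---------- B-side analysis: ranks, the flat occurrence list, min-rank resolution ----------

def pvRho (pos : Int) (name : String) : Int :=
  match pvClassifyIdx name with | some i => i | none => 3 + pos

def pvPhi (r : Int) (e : PvEmail) : PvEntry := (r, pvEmailId e, e)

def pvEnt (pe : Int × PvCat) : List PvEntry := pe.2.2.map (pvPhi (pvRho pe.1 pe.2.1))

def pvPair (e : PvEmail) : String × PvEmail := (pvEmailId e, e)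

-- id occurs somewhere with a rank strictly below r
def pvP (occ : List PvEntry) (r : Int) (id : String) : Prop :=
  ∃ t ∈ occ, t.2.1 = id ∧ t.1 < r

theorem occ_eq (ce : List PvCat) : pvOcc ce = (PySem.List.enumerate ce).flatMap pvEnt := by
  unfold pvOcc
  rw [PySem.List.foldl_congr_mem _ _ (fun acc pe => acc ++ pvEnt pe) []
    (by
      intro acc pe _
      show pe.2.2.foldl (fun acc e => acc ++ [pvPhi (pvRho pe.1 pe.2.1) e]) acc = acc ++ pvEnt pe
      rw [PySem.List.foldl_append_singleton_eq_map]; rfl)]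
  rw [PySem.List.foldl_append_eq_flatMap]
  rfl

theorem classifyIdx_eq (n : String) :
    pvClassifyIdx n = if pvM1 n then some 0 else if pvM2 n then some 1
      else if pvM3 n then some 2 else none := by
  have h1 : (["GitHub & Development", "GitHub Development"] : List String).any
      (fun p => PySem.Str.isIn p n) = pvM1 n := rfl
  have h2 : (["LinkedIn Professional", "Glassdoor Communications", "Jobleads Communications"] : List String).any
      (fun p => PySem.Str.isIn p n) = pvM2 n := rfl
  have h3 : (["Amazon Services", "Netflix Entertainment"] : List String).any
      (fun p => PySem.Str.isIn p n) = pvM3 n := rfl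
  simp only [pvClassifyIdx, pvMergePatterns, List.map, PySem.List.enumerate_cons,
    PySem.List.enumerate_nil, List.find?_cons, h1, h2, h3]
  cases pvM1 n <;> cases pvM2 n <;> cases pvM3 n <;> simp

theorem classifyIdx_range (n : String) (i : Int) (h : pvClassifyIdx n = some i) : 0 ≤ i ∧ i < 3 := by
  rw [classifyIdx_eq] at h
  split_ifs at h <;> simp_all <;> omega

theorem rho_some (pos : Int) (n : String) (i : Int) (h : pvClassifyIdx n = some i) :
    pvRho pos n = i := by simp [pvRho, h]

theorem rho_none (pos : Int) (n : String) (h : pvClassifyIdx n = none) :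
    pvRho pos n = 3 + pos := by simp [pvRho, h]

-- ---------- the min-rank dictionary computes the minimum rank of each id ----------

def pvMinStep (id : String) (o : Option Int) (t : PvEntry) : Option Int :=
  if t.2.1 = id then some (match o with | none => t.1 | some m => min m t.1) else o

theorem mr_get (l : List PvEntry) :
    ∀ (d : PySem.Dict String Int) (id : String),
      PySem.Dict.get? (l.foldl (fun d t => match PySem.Dict.get? d t.2.1 with
        | none => PySem.Dict.insert d t.2.1 t.1
        | some m => if t.1 < m then PySem.Dict.insert d t.2.1 t.1 else d) d) id
      = l.foldl (pvMinStep id) (PySem.Dict.get? d id) := by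
  induction l with
  | nil => intro d id; rfl
  | cons t l ih =>
    intro d id
    rw [List.foldl_cons, List.foldl_cons, ih]
    congr 1
    by_cases hid : t.2.1 = id
    · subst hid
      cases hd : PySem.Dict.get? d t.2.1 with
      | none => simp [hd, pvMinStep, PySem.Dict.get?_insert_self]
      | some m =>
        by_cases hlt : t.1 < m
        · have hmin : min m t.1 = t.1 := min_eq_right (le_of_lt hlt)
          simp [hd, hlt, pvMinStep, hmin, PySem.Dict.get?_insert_self]
        · have hmin : min m t.1 = m := min_eq_left (by omega)
          simp [hd, hlt, pvMinStep, hmin]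
    · have hgd : PySem.Dict.get? (match PySem.Dict.get? d t.2.1 with
          | none => PySem.Dict.insert d t.2.1 t.1
          | some m => if t.1 < m then PySem.Dict.insert d t.2.1 t.1 else d) id
          = PySem.Dict.get? d id := by
        cases hd : PySem.Dict.get? d t.2.1 with
        | none => exact PySem.Dict.get?_insert_of_ne d _ (fun h => hid h.symm)
        | some m =>
          by_cases hlt : t.1 < m
          · simp only [hlt, if_true]
            exact PySem.Dict.get?_insert_of_ne d _ (fun h => hid h.symm)
          · simp [hlt]
      rw [hgd]
      simp [pvMinStep, hid]

theorem minfold_le (id : String) :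
    ∀ (l : List PvEntry) (o : Option Int) (m : Int), l.foldl (pvMinStep id) o = some m →
      (∀ t ∈ l, t.2.1 = id → m ≤ t.1) ∧ (∀ m0, o = some m0 → m ≤ m0) := by
  intro l
  induction l with
  | nil =>
    intro o m h
    refine ⟨by simp, ?_⟩
    intro m0 h0
    simp only [List.foldl_nil, h0, Option.some.injEq] at h
    omega
  | cons t l ih =>
    intro o m h
    rw [List.foldl_cons] at h
    obtain ⟨ih1, ih2⟩ := ih (pvMinStep id o t) m h
    constructor
    · intro t' ht' hid'
      rcases List.mem_cons.mp ht' with rfl | ht'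
      · cases ho : o with
        | none => exact ih2 t'.1 (by simp [pvMinStep, hid', ho])
        | some m1 =>
          have hm : m ≤ min m1 t'.1 := ih2 _ (by simp [pvMinStep, hid', ho])
          exact le_trans hm (min_le_right m1 t'.1)
      · exact ih1 t' ht' hid'
    · intro m0 h0
      by_cases hid : t.2.1 = id
      · have hm : m ≤ min m0 t.1 := ih2 _ (by simp [pvMinStep, hid, h0])
        exact le_trans hm (min_le_left m0 t.1)
      · exact ih2 m0 (by simpa [pvMinStep, hid] using h0)

theorem minfold_mem (id : String) :
    ∀ (l : List PvEntry) (o : Option Int) (m : Int), l.foldl (pvMinStep id) o = some m →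
      (∃ e, (m, id, e) ∈ l) ∨ o = some m := by
  intro l
  induction l with
  | nil => intro o m h; exact Or.inr (by simpa using h)
  | cons t l ih =>
    intro o m h
    rw [List.foldl_cons] at h
    rcases ih (pvMinStep id o t) m h with ⟨e, he⟩ | hstep
    · exact Or.inl ⟨e, List.mem_cons_of_mem _ he⟩
    · by_cases hid : t.2.1 = id
      · simp only [pvMinStep, hid, if_true] at hstep
        cases ho : o with
        | none =>
          rw [ho] at hstep
          simp at hstep
          left
          refine ⟨t.2.2, ?_⟩
          have : t = (m, id, t.2.2) := by
            rw [← hstep, ← hid]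
          rw [← this]
          exact List.mem_cons_self ..
        | some m1 =>
          rw [ho] at hstep
          simp only [Option.some.injEq] at hstep
          rcases le_total m1 t.1 with hle | hle
          · right
            rw [min_eq_left hle] at hstep
            rw [hstep]
          · left
            rw [min_eq_right hle] at hstep
            refine ⟨t.2.2, ?_⟩
            have ht : t = (m, id, t.2.2) := by rw [← hstep, ← hid]
            rw [← ht]
            exact List.mem_cons_self ..
      · right; simpa [pvMinStep, hid] using hstep

theorem minfold_isSome_of_isSome (id : String) :
    ∀ (l : List PvEntry) (o : Option Int), o.isSome → (l.foldl (pvMinStep id) o).isSome := by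
  intro l
  induction l with
  | nil => intro o h; simpa using h
  | cons t l ih =>
    intro o h
    rw [List.foldl_cons]
    apply ih
    by_cases hid : t.2.1 = id <;> simp [pvMinStep, hid, h]

theorem minfold_isSome (id : String) :
    ∀ (l : List PvEntry) (o : Option Int) (r : Int) (e : PvEmail), (r, id, e) ∈ l →
      (l.foldl (pvMinStep id) o).isSome := by
  intro l
  induction l with
  | nil => intro o r e h; simp at h
  | cons t l ih =>
    intro o r e h
    rw [List.foldl_cons]
    rcases List.mem_cons.mp h with rfl | h
    · exact minfold_isSome_of_isSome id l _ (by simp [pvMinStep])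
    · exact ih _ r e h

theorem mr_iff (occ : List PvEntry) (r : Int) (id : String) (e : PvEmail)
    (ht : (r, id, e) ∈ occ) :
    PySem.Dict.get? (pvMinRank occ) id = some r ↔ ¬ pvP occ r id := by
  have hg : PySem.Dict.get? (pvMinRank occ) id = occ.foldl (pvMinStep id) none := by
    unfold pvMinRank
    rw [mr_get]
    rfl
  constructor
  · intro h hp
    rcases hp with ⟨t, htm, hid, hlt⟩
    rw [hg] at h
    have := (minfold_le id occ none r h).1 t htm hid
    omega
  · intro hnp
    have hs := minfold_isSome id occ none r e ht
    obtain ⟨m, hm⟩ := Option.isSome_iff_exists.mp hs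
    have h1 := (minfold_le id occ none m hm).1 _ ht rfl
    rcases minfold_mem id occ none m hm with ⟨e', he'⟩ | h2
    · have hne : ¬ (m < r) := fun hlt => hnp ⟨(m, id, e'), he', rfl, hlt⟩
      have hmr : m = r := by simp at h1; omega
      rw [hg, hm, hmr]
    · simp at h2

-- ---------- sequential take over an entry list, C-side and B-side ----------

def pvCTake (st : PySem.Set String × List PvEmail) (es : List (String × PvEmail)) :
    PySem.Set String × List PvEmail :=
  es.foldl (fun st p =>
    if p.1 ∈ st.1 then st else (PySem.Set.add st.1 p.1, st.2 ++ [p.2])) st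

def pvBTake (mr : PySem.Dict String Int) (r : Int) (st : PySem.Set String × List PvEmail)
    (es : List (String × PvEmail)) : PySem.Set String × List PvEmail :=
  es.foldl (fun sk p =>
    if PySem.Dict.get? mr p.1 = some r ∧ p.1 ∉ sk.1 then
      (PySem.Set.add sk.1 p.1, sk.2 ++ [p.2])
    else sk) st

theorem take_eq_cTake (es : List PvEmail) :
    ∀ (u : PySem.Set String) (ks : List PvEmail),
      pvCTake (u, ks) (es.map pvPair) = ((pvTake u es).1, ks ++ (pvTake u es).2) := by
  induction es with
  | nil => intro u ks; simp [pvCTake, pvTake]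
  | cons e es ih =>
    intro u ks
    rw [take_eq_go, go_cons]
    simp only [List.map_cons, pvCTake, List.foldl_cons]
    by_cases h : pvEmailId e ∈ u
    · rw [if_pos (by simpa [pvPair] using h), if_pos h, ← take_eq_go]
      exact ih u ks
    · rw [if_neg (by simpa [pvPair] using h), if_neg h]
      show pvCTake (PySem.Set.add u (pvEmailId e), ks ++ [e]) (es.map pvPair) = _
      rw [ih]
      simp only [List.nil_append]
      rw [go_acc es _ [e], take_eq_go]
      simp

theorem cTake_set (es : List (String × PvEmail)) :
    ∀ (st : PySem.Set String × List PvEmail) (id : String),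
      id ∈ (pvCTake st es).1 ↔ id ∈ st.1 ∨ ∃ p ∈ es, p.1 = id := by
  induction es with
  | nil => intro st id; simp [pvCTake]
  | cons t es ih =>
    intro st id
    simp only [pvCTake, List.foldl_cons]
    by_cases h : t.1 ∈ st.1
    · rw [if_pos h]
      rw [show (List.foldl _ st es : PySem.Set String × List PvEmail) = pvCTake st es from rfl, ih]
      constructor
      · rintro (hm | hm)
        · exact Or.inl hm
        · exact Or.inr (by rcases hm with ⟨t', ht', hid⟩; exact ⟨t', List.mem_cons_of_mem _ ht', hid⟩)
      · rintro (hm | ⟨t', ht', hid⟩)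
        · exact Or.inl hm
        · rcases List.mem_cons.mp ht' with rfl | ht'
          · exact Or.inl (hid ▸ h)
          · exact Or.inr ⟨t', ht', hid⟩
    · rw [if_neg h]
      rw [show (List.foldl _ _ es : PySem.Set String × List PvEmail)
        = pvCTake (PySem.Set.add st.1 t.1, st.2 ++ [t.2]) es from rfl, ih]
      simp only [PySem.Set.mem_add]
      constructor
      · rintro ((hm | rfl) | ⟨t', ht', hid⟩)
        · exact Or.inl hm
        · exact Or.inr ⟨t, List.mem_cons_self .., rfl⟩
        · exact Or.inr ⟨t', List.mem_cons_of_mem _ ht', hid⟩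
      · rintro (hm | ⟨t', ht', hid⟩)
        · exact Or.inl (Or.inl hm)
        · rcases List.mem_cons.mp ht' with rfl | ht'
          · exact Or.inl (Or.inr hid.symm)
          · exact Or.inr ⟨t', ht', hid⟩

theorem groups_getD (occ : List PvEntry) (r : Int) :
    PySem.Dict.getD (pvGroups occ) r []
      = (occ.filter (fun t => decide (t.1 = r))).map (fun t => (t.2.1, t.2.2)) := by
  unfold pvGroups
  have h1 : occ.foldl (fun d t => PySem.Dict.modify d t.1 [] (fun l => l ++ [(t.2.1, t.2.2)]))
        (PySem.Dict.mk [])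
      = (occ.map (fun t => (t.1, (t.2.1, t.2.2)))).foldl
          (fun d p => PySem.Dict.modify d p.1 [] (fun l => l ++ [p.2])) (PySem.Dict.mk []) := by
    rw [List.foldl_map]
  rw [h1, PySem.Dict.getD_foldl_modify_append, List.filter_map, List.map_map]
  have h2 : List.filter ((fun p => p.1 == r) ∘ (fun t : PvEntry => (t.1, (t.2.1, t.2.2)))) occ
      = occ.filter (fun t => decide (t.1 = r)) := by
    apply List.filter_congr
    intro t _
    by_cases h : t.1 = r <;> simp [h]
  rw [h2]
  rfl

theorem collect_eq_bTake (occ : List PvEntry) (mr : PySem.Dict String Int) (r : Int) :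
    pvCollect (pvGroups occ) mr r
      = (pvBTake mr r (PySem.Set.empty, [])
          ((occ.filter (fun t => decide (t.1 = r))).map (fun t => (t.2.1, t.2.2)))).2 := by
  unfold pvCollect pvBTake
  rw [groups_getD]

theorem core_take (occ : List PvEntry) (r : Int) :
    ∀ (es : List (String × PvEmail)) (u seen : PySem.Set String) (ks : List PvEmail),
      (∀ p ∈ es, (r, p.1, p.2) ∈ occ) →
      (∀ id, id ∈ u ↔ (pvP occ r id ∨ id ∈ seen)) →
      (pvCTake (u, ks) es).2 = (pvBTake (pvMinRank occ) r (seen, ks) es).2 := by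
  intro es
  induction es with
  | nil => intro u seen ks _ _; rfl
  | cons t es ih =>
    intro u seen ks hes hU
    have hocc' : (r, t.1, t.2) ∈ occ := hes t (List.mem_cons_self ..)
    have hrest : ∀ p ∈ es, (r, p.1, p.2) ∈ occ := fun p h => hes p (List.mem_cons_of_mem _ h)
    simp only [pvCTake, pvBTake, List.foldl_cons]
    by_cases hu : t.1 ∈ u
    · rw [if_pos hu]
      rcases (hU t.1).mp hu with hP | hseen
      · have hget : ¬ (PySem.Dict.get? (pvMinRank occ) t.1 = some r) :=
          fun hh => (mr_iff occ r t.1 t.2 hocc').mp hh hP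
        rw [if_neg (by intro hc; exact hget hc.1)]
        exact ih u seen ks hrest hU
      · rw [if_neg (by intro hc; exact hc.2 hseen)]
        exact ih u seen ks hrest hU
    · have hns := fun h => hu ((hU t.1).mpr h)
      have hnP : ¬ pvP occ r t.1 := fun h => hns (Or.inl h)
      have hnseen : t.1 ∉ seen := fun h => hns (Or.inr h)
      have hget : PySem.Dict.get? (pvMinRank occ) t.1 = some r :=
        (mr_iff occ r t.1 t.2 hocc').mpr hnP
      rw [if_neg hu, if_pos ⟨hget, hnseen⟩]
      apply ih _ _ _ hrest
      intro id
      simp only [PySem.Set.mem_add]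
      constructor
      · rintro (hm | rfl)
        · rcases (hU id).mp hm with h | h
          · exact Or.inl h
          · exact Or.inr (Or.inl h)
        · exact Or.inr (Or.inr rfl)
      · rintro (h | h | rfl)
        · exact Or.inl ((hU id).mpr (Or.inl h))
        · exact Or.inl ((hU id).mpr (Or.inr h))
        · exact Or.inr rfl

theorem bfold_eq_cTake (beta : String → Bool) :
    ∀ (ce : List PvCat) (u : PySem.Set String) (p : List PvEmail),
      pvBfold beta ce (u, p)
        = pvCTake (u, p) (ce.flatMap (fun ne => if beta ne.1 then ne.2.map pvPair else [])) := by
  intro ce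
  induction ce with
  | nil => intro u p; simp [pvBfold, pvCTake]
  | cons ne ce ih =>
    intro u p
    simp only [pvBfold, List.foldl_cons, List.flatMap_cons]
    by_cases hb : beta ne.1 = true
    · simp only [hb, if_true]
      rw [show (pvCTake (u, p) (ne.2.map pvPair ++ _) : PySem.Set String × List PvEmail)
        = pvCTake (pvCTake (u, p) (ne.2.map pvPair)) _ from List.foldl_append ..]
      rw [take_eq_cTake]
      exact ih (pvTake u ne.2).1 (p ++ (pvTake u ne.2).2)
    · simp only [hb, Bool.false_eq_true, if_false, List.nil_append]
      exact ih u p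

-- ---------- the flat occurrence list filtered at a rank ----------

theorem flatMap_congr_mem {A B : Type} (l : List A) (f g : A → List B)
    (h : ∀ x ∈ l, f x = g x) : l.flatMap f = l.flatMap g := by
  induction l with
  | nil => rfl
  | cons x l ih =>
    simp only [List.flatMap_cons]
    rw [h x (List.mem_cons_self ..), ih (fun y hy => h y (List.mem_cons_of_mem _ hy))]

theorem flatMap_single {A B : Type} (l : List A) (g : A → List B) (x : A)
    (hx : x ∈ l) (hnd : l.Nodup) (hothers : ∀ y ∈ l, y ≠ x → g y = []) :
    l.flatMap g = g x := by
  induction l with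
  | nil => simp at hx
  | cons a l ih =>
    simp only [List.flatMap_cons]
    rcases List.mem_cons.mp hx with rfl | hx
    · have : l.flatMap g = [] := List.flatMap_eq_nil_iff.mpr (fun y hy =>
        hothers y (List.mem_cons_of_mem _ hy) (fun hxy => (List.nodup_cons.mp hnd).1 (hxy ▸ hy)))
      rw [this, List.append_nil]
    · rw [hothers a (List.mem_cons_self ..) (fun hax => (List.nodup_cons.mp hnd).1 (hax ▸ hx)),
        List.nil_append]
      exact ih hx (List.nodup_cons.mp hnd).2
        (fun y hy hy2 => hothers y (List.mem_cons_of_mem _ hy) hy2)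

theorem enum_nodup (ce : List PvCat) : (PySem.List.enumerate ce).Nodup := by
  have := PySem.List.pairwise_lt_enumerate ce 0
  exact this.imp (fun h heq => by rw [heq] at h; exact lt_irrefl _ h)

theorem enum_fst_nonneg (ce : List PvCat) (pe : Int × PvCat) (h : pe ∈ PySem.List.enumerate ce) :
    0 ≤ pe.1 := by
  obtain ⟨k, hk, rfl⟩ := (PySem.List.mem_enumerate_iff ce 0 pe).mp h
  simp

theorem enum_fst_inj (ce : List PvCat) (pe pe' : Int × PvCat)
    (h : pe ∈ PySem.List.enumerate ce) (h' : pe' ∈ PySem.List.enumerate ce)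
    (heq : pe.1 = pe'.1) : pe = pe' := by
  obtain ⟨k, hk, rfl⟩ := (PySem.List.mem_enumerate_iff ce 0 pe).mp h
  obtain ⟨k', hk', rfl⟩ := (PySem.List.mem_enumerate_iff ce 0 pe').mp h'
  simp at heq
  subst heq
  rfl

theorem occ_filter (ce : List PvCat) (q : Int) :
    (pvOcc ce).filter (fun t => decide (t.1 = q)) =
      (PySem.List.enumerate ce).flatMap
        (fun pe => if pvRho pe.1 pe.2.1 = q then pe.2.2.map (pvPhi q) else []) := by
  rw [occ_eq, List.filter_flatMap]
  apply flatMap_congr_mem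
  intro pe _
  unfold pvEnt
  rw [List.filter_map]
  by_cases h : pvRho pe.1 pe.2.1 = q
  · rw [if_pos h, h]
    have hcomp : ((fun t => decide (t.1 = q)) ∘ pvPhi q) = fun _ => true := by
      funext e; simp [pvPhi]
    rw [hcomp, List.filter_true]
  · rw [if_neg h]
    have hcomp : ((fun t => decide (t.1 = q)) ∘ pvPhi (pvRho pe.1 pe.2.1)) = fun _ => false := by
      funext e; simp [pvPhi, h]
    rw [hcomp, List.filter_false, List.map_nil]

theorem occ_filter_target (ce : List PvCat) (i : Int) (hi : i < 3) (beta : String → Bool)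
    (hbeta : ∀ n, beta n = true ↔ pvClassifyIdx n = some i) :
    ce.flatMap (fun ne => if beta ne.1 then ne.2.map (pvPhi i) else [])
      = (pvOcc ce).filter (fun t => decide (t.1 = i)) := by
  rw [occ_filter]
  conv_lhs => rw [← PySem.List.map_snd_enumerate ce 0]
  rw [List.flatMap_map]
  apply flatMap_congr_mem
  intro pe hpe
  have hpos := enum_fst_nonneg ce pe hpe
  have hcond : beta pe.2.1 = true ↔ pvRho pe.1 pe.2.1 = i := by
    constructor
    · intro h
      exact rho_some pe.1 pe.2.1 i ((hbeta pe.2.1).mp h)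
    · intro h
      cases hc : pvClassifyIdx pe.2.1 with
      | some j =>
        rw [rho_some pe.1 pe.2.1 j hc] at h
        exact (hbeta pe.2.1).mpr (h ▸ hc)
      | none =>
        rw [rho_none pe.1 pe.2.1 hc] at h
        omega
  by_cases hb : beta pe.2.1 = true
  · rw [if_pos hb, if_pos (hcond.mp hb)]
  · rw [if_neg hb, if_neg (fun h => hb (hcond.mpr h))]

theorem occ_filter_target_pairs (ce : List PvCat) (i : Int) (hi : i < 3) (beta : String → Bool)
    (hbeta : ∀ n, beta n = true ↔ pvClassifyIdx n = some i) :
    ce.flatMap (fun ne => if beta ne.1 then ne.2.map pvPair else [])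
      = ((pvOcc ce).filter (fun t => decide (t.1 = i))).map (fun t => (t.2.1, t.2.2)) := by
  rw [← occ_filter_target ce i hi beta hbeta, List.map_flatMap]
  apply flatMap_congr_mem
  intro ne _
  by_cases hb : beta ne.1 = true
  · rw [if_pos hb, if_pos hb, List.map_map]
    rfl
  · rw [if_neg hb, if_neg hb]
    rfl

theorem exists_pair_iff (l : List PvEntry) (id : String) :
    (∃ p ∈ l.map (fun t => (t.2.1, t.2.2)), p.1 = id) ↔ ∃ t ∈ l, t.2.1 = id := by
  constructor
  · rintro ⟨p, hp, hid⟩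
    obtain ⟨t, ht, rfl⟩ := List.mem_map.mp hp
    exact ⟨t, ht, hid⟩
  · rintro ⟨t, ht, hid⟩
    exact ⟨(t.2.1, t.2.2), List.mem_map.mpr ⟨t, ht, rfl⟩, hid⟩

theorem occ_filter_pos (ce : List PvCat) (pe0 : Int × PvCat)
    (h0 : pe0 ∈ PySem.List.enumerate ce) :
    (pvOcc ce).filter (fun t => decide (t.1 = 3 + pe0.1)) =
      (if pvClassifyIdx pe0.2.1 = none then pe0.2.2.map (pvPhi (3 + pe0.1)) else []) := by
  have hpos := enum_fst_nonneg ce pe0 h0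
  rw [occ_filter]
  have hne : ∀ pe ∈ PySem.List.enumerate ce, pe ≠ pe0 → pvRho pe.1 pe.2.1 ≠ 3 + pe0.1 := by
    intro pe hpe hneq
    cases hc : pvClassifyIdx pe.2.1 with
    | some j =>
      rw [rho_some pe.1 pe.2.1 j hc]
      have := classifyIdx_range pe.2.1 j hc
      omega
    | none =>
      rw [rho_none pe.1 pe.2.1 hc]
      intro h
      exact hneq (enum_fst_inj ce pe pe0 hpe h0 (by omega))
  by_cases hc0 : pvClassifyIdx pe0.2.1 = none
  · rw [if_pos hc0]
    rw [flatMap_single _ _ pe0 h0 (enum_nodup ce) (fun y hy hne' => by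
      rw [if_neg (hne y hy hne')])]
    rw [if_pos (rho_none pe0.1 pe0.2.1 hc0)]
  · rw [if_neg hc0]
    apply List.flatMap_eq_nil_iff.mpr
    intro pe hpe
    by_cases hpe0 : pe = pe0
    · subst hpe0
      rw [if_neg]
      cases hc : pvClassifyIdx pe.2.1 with
      | some j =>
        rw [rho_some pe.1 pe.2.1 j hc]
        have := classifyIdx_range pe.2.1 j hc
        omega
      | none => exact absurd hc hc0
    · rw [if_neg (hne pe hpe hpe0)]

theorem P_succ (occ : List PvEntry) (r : Int) (id : String) :
    pvP occ (r + 1) id ↔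
      pvP occ r id ∨ ∃ t ∈ occ.filter (fun t => decide (t.1 = r)), t.2.1 = id := by
  constructor
  · rintro ⟨t, ht, hid, hlt⟩
    by_cases h : t.1 < r
    · exact Or.inl ⟨t, ht, hid, h⟩
    · have : t.1 = r := by omega
      exact Or.inr ⟨t, List.mem_filter.mpr ⟨ht, by simp [this]⟩, hid⟩
  · rintro (⟨t, ht, hid, hlt⟩ | ⟨t, ht, hid⟩)
    · exact ⟨t, ht, hid, by omega⟩
    · obtain ⟨htm, htr⟩ := List.mem_filter.mp ht
      simp at htr
      exact ⟨t, htm, hid, by omega⟩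

theorem mem_occ (ce : List PvCat) (ne : PvCat) (hne : ne ∈ ce) (e : PvEmail) (he : e ∈ ne.2)
    (j : Int) (hc : pvClassifyIdx ne.1 = some j) :
    (j, pvEmailId e, e) ∈ pvOcc ce := by
  rw [occ_eq]
  obtain ⟨k, hk, hget⟩ := List.mem_iff_getElem.mp hne
  apply List.mem_flatMap.mpr
  refine ⟨((k : Int), ne), ?_, ?_⟩
  · exact (PySem.List.mem_enumerate_iff ce 0 _).mpr ⟨k, hk, by simp [hget]⟩
  · unfold pvEnt
    simp only
    rw [rho_some (k : Int) ne.1 j hc]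
    exact List.mem_map.mpr ⟨e, he, rfl⟩

theorem occ_rank_nonneg (ce : List PvCat) (t : PvEntry) (ht : t ∈ pvOcc ce) : 0 ≤ t.1 := by
  rw [occ_eq] at ht
  obtain ⟨pe, hpe, htm⟩ := List.mem_flatMap.mp ht
  obtain ⟨e, _, rfl⟩ := List.mem_map.mp htm
  have hpos := enum_fst_nonneg ce pe hpe
  show 0 ≤ pvRho pe.1 pe.2.1
  cases hc : pvClassifyIdx pe.2.1 with
  | some j =>
    rw [rho_some pe.1 pe.2.1 j hc]
    exact (classifyIdx_range pe.2.1 j hc).1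
  | none =>
    rw [rho_none pe.1 pe.2.1 hc]
    omega

-- ---------- the per-target pass, bridged to B's collect ----------

def pvBStep (groups : PySem.Dict Int (List (String × PvEmail))) (mr : PySem.Dict String Int)
    (d : PySem.Dict String (List PvEmail)) (i : Int) (t : String) :
    PySem.Dict String (List PvEmail) :=
  let kept := pvCollect groups mr i
  if kept ≠ [] then
    PySem.Dict.insert d (t ++ " (" ++ PySem.Int.toStr (kept.length : Int) ++ " emails)") kept
  else d

theorem pass_target (ce : List PvCat) (i : Int) (hi : i < 3) (t : String)
    (mu beta : String → Bool)
    (hbm : ∀ n, beta n = true → mu n = true)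
    (hbeta : ∀ n, beta n = true ↔ pvClassifyIdx n = some i)
    (hprev : ∀ n, mu n = true → beta n = false → ∃ j, pvClassifyIdx n = some j ∧ j < i)
    (st : PvSt) (hU : ∀ id, id ∈ st.2 ↔ pvP (pvOcc ce) i id) :
    (pvApass mu t ce st).1 = pvBStep (pvGroups (pvOcc ce)) (pvMinRank (pvOcc ce)) st.1 i t
      ∧ ∀ id, id ∈ (pvApass mu t ce st).2 ↔ pvP (pvOcc ce) (i + 1) id := by
  have hinv : ∀ ne ∈ ce, mu ne.1 = true → beta ne.1 = false → ∀ e ∈ ne.2, pvEmailId e ∈ st.2 := by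
    intro ne hne hm hb e he
    obtain ⟨j, hj, hlt⟩ := hprev ne.1 hm hb
    exact (hU _).mpr ⟨(j, pvEmailId e, e), mem_occ ce ne hne e he j hj, rfl, hlt⟩
  have hfe := fold_eq mu beta hbm ce st.2 [] [] hinv
  simp only [List.nil_append] at hfe
  have hb2 : pvBfold beta ce (st.2, [])
      = pvCTake (st.2, [])
          (((pvOcc ce).filter (fun t => decide (t.1 = i))).map (fun t => (t.2.1, t.2.2))) := by
    rw [bfold_eq_cTake beta, occ_filter_target_pairs ce i hi beta hbeta]
  have hmemocc : ∀ p ∈ ((pvOcc ce).filter (fun t => decide (t.1 = i))).map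
      (fun t => (t.2.1, t.2.2)), (i, p.1, p.2) ∈ pvOcc ce := by
    intro p hp
    obtain ⟨t', ht', rfl⟩ := List.mem_map.mp hp
    obtain ⟨h1, h2⟩ := List.mem_filter.mp ht'
    have h2' : t'.1 = i := by simpa using h2
    have : t' = (i, t'.2.1, t'.2.2) := by rw [← h2']
    rw [← this]
    exact h1
  have hkept : (pvBfold beta ce (st.2, [])).2
      = pvCollect (pvGroups (pvOcc ce)) (pvMinRank (pvOcc ce)) i := by
    rw [hb2, collect_eq_bTake]
    apply core_take _ _ _ _ _ _ hmemocc
    intro id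
    rw [hU id]
    simp [PySem.Set.empty]
  have hset : ∀ id, id ∈ (pvBfold beta ce (st.2, [])).1 ↔ pvP (pvOcc ce) (i + 1) id := by
    intro id
    rw [hb2, cTake_set, exists_pair_iff, P_succ]
    simp only
    rw [hU id]
  unfold pvApass
  rw [hfe]
  constructor
  · simp only [pvBStep]
    rw [hkept]
    by_cases h : pvCollect (pvGroups (pvOcc ce)) (pvMinRank (pvOcc ce)) i ≠ [] <;> simp [h]
  · intro id
    by_cases h : (pvBfold beta ce (st.2, [])).2 ≠ []
    · rw [if_pos h]; exact hset id
    · rw [if_neg h]; exact hset id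

-- beta characterizations for the three targets
theorem beta1_iff (n : String) : pvM1 n = true ↔ pvClassifyIdx n = some 0 := by
  rw [classifyIdx_eq]
  cases h1 : pvM1 n <;> cases h2 : pvM2 n <;> cases h3 : pvM3 n <;> simp

theorem beta2_iff (n : String) : (!pvM1 n && pvM2 n) = true ↔ pvClassifyIdx n = some 1 := by
  rw [classifyIdx_eq]
  cases h1 : pvM1 n <;> cases h2 : pvM2 n <;> cases h3 : pvM3 n <;> simp

theorem beta3_iff (n : String) : (!pvM1 n && !pvM2 n && pvM3 n) = true ↔ pvClassifyIdx n = some 2 := by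
  rw [classifyIdx_eq]
  cases h1 : pvM1 n <;> cases h2 : pvM2 n <;> cases h3 : pvM3 n <;> simp

theorem classifyIdx_none_iff (n : String) :
    pvClassifyIdx n = none ↔ (pvM1 n || pvM2 n || pvM3 n) = false := by
  rw [classifyIdx_eq]
  cases h1 : pvM1 n <;> cases h2 : pvM2 n <;> cases h3 : pvM3 n <;> simp

theorem condA_eq (n : String) :
    pvMergePatterns.any (fun tp => tp.2.any (fun p => PySem.Str.isIn p n))
      = (pvM1 n || pvM2 n || pvM3 n) := by
  simp [pvMergePatterns, pvM1, pvM2, pvM3, Bool.or_assoc]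

-- ---------- the second pass, bridged to B's per-position collects ----------

theorem pass2_core (ce : List PvCat) :
    ∀ (tail : List PvCat) (s : Int), 0 ≤ s →
      (∀ pe ∈ PySem.List.enumerate tail s, pe ∈ PySem.List.enumerate ce) →
      ∀ (st : PvSt) (db : PySem.Dict String (List PvEmail)), st.1 = db →
      (∀ id, id ∈ st.2 ↔ pvP (pvOcc ce) (3 + s) id) →
      ((PySem.List.enumerate tail s).foldl (fun st pe =>
          if pvMergePatterns.any (fun tp => tp.2.any (fun p => PySem.Str.isIn p pe.2.1)) then st
          else
            let rs := pvCollectA pe.2.2 ([], st.2)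
            if rs.1 ≠ [] then (PySem.Dict.insert st.1 pe.2.1 rs.1, rs.2) else (st.1, rs.2)) st).1
        = (PySem.List.enumerate tail s).foldl (fun d pe =>
            if pvClassifyIdx pe.2.1 = none then
              let kept := pvCollect (pvGroups (pvOcc ce)) (pvMinRank (pvOcc ce)) (3 + pe.1)
              if kept ≠ [] then PySem.Dict.insert d pe.2.1 kept else d
            else d) db := by
  intro tail
  induction tail with
  | nil => intro s _ _ st db hdb _; simpa [PySem.List.enumerate] using hdb
  | cons ne tail ih =>
    intro s hs hmem st db hdb hU
    rw [PySem.List.enumerate_cons, List.foldl_cons, List.foldl_cons]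
    simp only [show ((s, ne) : Int × PvCat).2.1 = ne.1 from rfl,
      show ((s, ne) : Int × PvCat).2.2 = ne.2 from rfl,
      show ((s, ne) : Int × PvCat).1 = s from rfl]
    have hhead : ((s, ne) : Int × PvCat) ∈ PySem.List.enumerate ce := by
      apply hmem
      rw [PySem.List.enumerate_cons]
      exact List.mem_cons_self ..
    have hmem' : ∀ pe ∈ PySem.List.enumerate tail (s + 1), pe ∈ PySem.List.enumerate ce := by
      intro pe hpe
      apply hmem
      rw [PySem.List.enumerate_cons]
      exact List.mem_cons_of_mem _ hpe
    have hfilter := occ_filter_pos ce (s, ne) hhead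
    simp only [show ((s, ne) : Int × PvCat).2.1 = ne.1 from rfl,
      show ((s, ne) : Int × PvCat).2.2 = ne.2 from rfl,
      show ((s, ne) : Int × PvCat).1 = s from rfl] at hfilter
    by_cases hc : pvClassifyIdx ne.1 = none
    · -- unmerged category: both sides take and (maybe) insert the same entry
      have hcondA : pvMergePatterns.any (fun tp => tp.2.any (fun p => PySem.Str.isIn p ne.1)) = false := by
        rw [condA_eq]
        exact (classifyIdx_none_iff ne.1).mp hc
      rw [if_neg (by rw [hcondA]; exact Bool.false_ne_true), if_pos hc]
      rw [if_pos hc] at hfilter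
      have hCt := collect_eq_take ne.2 [] st.2
      have hpairs : ((pvOcc ce).filter (fun t => decide (t.1 = 3 + s))).map
          (fun t => (t.2.1, t.2.2)) = ne.2.map pvPair := by
        rw [hfilter, List.map_map]
        rfl
      have hkept : (pvTake st.2 ne.2).2
          = pvCollect (pvGroups (pvOcc ce)) (pvMinRank (pvOcc ce)) (3 + s) := by
        rw [collect_eq_bTake, hpairs]
        have hct := take_eq_cTake ne.2 st.2 []
        have hbt := core_take (pvOcc ce) (3 + s) (ne.2.map pvPair) st.2 PySem.Set.empty []
          (by
            intro p hp
            have hp' : p ∈ ((pvOcc ce).filter (fun t => decide (t.1 = 3 + s))).map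
                (fun t => (t.2.1, t.2.2)) := by rw [hpairs]; exact hp
            obtain ⟨t', ht', rfl⟩ := List.mem_map.mp hp'
            obtain ⟨h1, h2⟩ := List.mem_filter.mp ht'
            have h2' : t'.1 = 3 + s := by simpa using h2
            have het : t' = (3 + s, t'.2.1, t'.2.2) := by rw [← h2']
            rw [← het]
            exact h1)
          (by intro id; rw [hU id]; simp [PySem.Set.empty])
        rw [← hbt, hct]
        simp
      have hset : ∀ id, id ∈ (pvTake st.2 ne.2).1 ↔ pvP (pvOcc ce) (3 + (s + 1)) id := by
        intro id
        have h1 : (pvTake st.2 ne.2).1 = (pvCTake (st.2, []) (ne.2.map pvPair)).1 := by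
          rw [take_eq_cTake]
        rw [h1, ← hpairs, cTake_set, exists_pair_iff]
        have h2 : (3 : Int) + (s + 1) = (3 + s) + 1 := by ring
        rw [h2, P_succ]
        simp only
        rw [hU id]
      rw [hCt]
      simp only [List.nil_append]
      by_cases hk : (pvTake st.2 ne.2).2 ≠ []
      · rw [if_pos (by simpa using hk), if_pos (by rw [← hkept]; simpa using hk)]
        exact ih (s + 1) (by omega) hmem' _ _ (by rw [hdb, hkept]) hset
      · rw [if_neg (by simpa using hk), if_neg (by rw [← hkept]; simpa using hk)]
        exact ih (s + 1) (by omega) hmem' _ _ hdb hset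
    · -- merged category: skipped on both sides, invariant shifts trivially
      have hcondA : pvMergePatterns.any (fun tp => tp.2.any (fun p => PySem.Str.isIn p ne.1)) = true := by
        rw [condA_eq]
        cases h : (pvM1 ne.1 || pvM2 ne.1 || pvM3 ne.1)
        · exact absurd ((classifyIdx_none_iff ne.1).mpr h) hc
        · rfl
      rw [if_pos hcondA, if_neg hc]
      rw [if_neg hc] at hfilter
      have hset : ∀ id, id ∈ st.2 ↔ pvP (pvOcc ce) (3 + (s + 1)) id := by
        intro id
        have h2 : (3 : Int) + (s + 1) = (3 + s) + 1 := by ring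
        rw [h2, P_succ, hfilter, hU id]
        simp
      exact ih (s + 1) (by omega) hmem' st db hdb hset

-- ---------- assembly ----------

theorem main_eq (ce : List PvCat) :
    post_process_categories_py ce = post_process_categories_py_alt ce := by
  have hA : post_process_categories_py ce =
      (pvA2 ce (pvApass pvM3 "Entertainment & Media" ce
        (pvApass pvM2 "Professional Development" ce
          (pvApass pvM1 "GitHub Development" ce
            ((PySem.Dict.mk [] : PySem.Dict String (List PvEmail)),
             (PySem.Set.empty : PySem.Set String)))))).1.items := rfl
  set occ := pvOcc ce with hocc
  set mr := pvMinRank occ with hmr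
  set groups := pvGroups occ with hgroups
  have hB : post_process_categories_py_alt ce =
      ((PySem.List.enumerate ce).foldl (fun d pe =>
          if pvClassifyIdx pe.2.1 = none then
            let kept := pvCollect groups mr (3 + pe.1)
            if kept ≠ [] then PySem.Dict.insert d pe.2.1 kept else d
          else d)
        (pvBStep groups mr (pvBStep groups mr (pvBStep groups mr (PySem.Dict.mk [])
          0 "GitHub Development") 1 "Professional Development") 2 "Entertainment & Media")).items := by
    rfl
  set st0 : PvSt := ((PySem.Dict.mk [] : PySem.Dict String (List PvEmail)),
    (PySem.Set.empty : PySem.Set String)) with hst0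
  have hU0 : ∀ id, id ∈ st0.2 ↔ pvP occ 0 id := by
    intro id
    constructor
    · intro h; exact absurd h (by simp [hst0, PySem.Set.empty])
    · rintro ⟨t, ht, _, hlt⟩
      have := occ_rank_nonneg ce t ht
      omega
  have hp1 := pass_target ce 0 (by omega) "GitHub Development" pvM1 pvM1
    (fun _ h => h) beta1_iff (fun n hm hb => absurd hm (by simp [hb])) st0 hU0
  set s1 : PvSt := pvApass pvM1 "GitHub Development" ce st0 with hs1
  have hU1 : ∀ id, id ∈ s1.2 ↔ pvP occ 1 id := by
    intro id
    have := hp1.2 id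
    norm_num at this
    exact this
  have hp2 := pass_target ce 1 (by omega) "Professional Development" pvM2
    (fun n => !pvM1 n && pvM2 n) (fun n h => ((Bool.and_eq_true _ _).mp h).2) beta2_iff
    (fun n hm hb => by
      refine ⟨0, (beta1_iff n).mp ?_, by omega⟩
      have hb' : (!pvM1 n && pvM2 n) = false := hb
      cases h1 : pvM1 n
      · rw [h1, hm] at hb'
        simp at hb'
      · rfl) s1 hU1
  set s2 : PvSt := pvApass pvM2 "Professional Development" ce s1 with hs2
  have hU2 : ∀ id, id ∈ s2.2 ↔ pvP occ 2 id := by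
    intro id
    have := hp2.2 id
    norm_num at this
    exact this
  have hp3 := pass_target ce 2 (by omega) "Entertainment & Media" pvM3
    (fun n => !pvM1 n && !pvM2 n && pvM3 n) (fun n h => ((Bool.and_eq_true _ _).mp h).2) beta3_iff
    (fun n hm hb => by
      have hb' : (!pvM1 n && !pvM2 n && pvM3 n) = false := hb
      by_cases h1 : pvM1 n = true
      · exact ⟨0, (beta1_iff n).mp h1, by omega⟩
      · have h1' : pvM1 n = false := by simpa using h1
        by_cases h2 : pvM2 n = true
        · refine ⟨1, (beta2_iff n).mp ?_, by omega⟩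
          rw [h1', h2]
          rfl
        · exfalso
          have h2' : pvM2 n = false := by simpa using h2
          rw [h1', h2', hm] at hb'
          simp at hb') s2 hU2
  set s3 : PvSt := pvApass pvM3 "Entertainment & Media" ce s2 with hs3
  have hU3 : ∀ id, id ∈ s3.2 ↔ pvP occ (3 + 0) id := by
    intro id
    have := hp3.2 id
    norm_num at this
    exact this
  have hd3 : s3.1 = pvBStep groups mr (pvBStep groups mr (pvBStep groups mr (PySem.Dict.mk [])
      0 "GitHub Development") 1 "Professional Development") 2 "Entertainment & Media" := by
    rw [hs3, hp3.1, hs2, hp2.1, hs1, hp1.1]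
  have hA2 : pvA2 ce s3 = (PySem.List.enumerate ce).foldl (fun st pe =>
      if pvMergePatterns.any (fun tp => tp.2.any (fun p => PySem.Str.isIn p pe.2.1)) then st
      else
        let rs := pvCollectA pe.2.2 ([], st.2)
        if rs.1 ≠ [] then (PySem.Dict.insert st.1 pe.2.1 rs.1, rs.2) else (st.1, rs.2)) s3 := by
    unfold pvA2
    conv_lhs => rw [← PySem.List.map_snd_enumerate ce 0]
    rw [List.foldl_map]
  rw [hA, hB, hA2]
  rw [pass2_core ce ce 0 (by omega) (fun pe hpe => hpe) s3 _ hd3 hU3]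

-- ===== VERDICT (by name: the statement is the Claim_ definition above) =====
theorem post_process_categories_py_spec : Claim_equal_post_process_categories_py := by
  intro ce _
  show post_process_categories_py ce = post_process_categories_py_alt ce
  exact main_eq ce
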